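-- pv_equiv track=rewrite | github.com/jvorndran/Unravel | rag_visualizer/ui/components/chunk_viewer.py | _normalized_prefix_length
-- ===== SOURCE A (Python) =====
-- def _normalized_prefix_length(text: str, normalized_len: int) -> int:
--     """Map normalized prefix length back to original text prefix length."""
--     if normalized_len <= 0:
--         return 0
--     normalized_count = 0
--     prefix_len = 0
--     in_space = False
--     for i, ch in enumerate(text):
--         prefix_len = i + 1
--         if ch.isspace():
--             if not in_space and normalized_count > 0:
--                 normalized_count += 1
--             in_space = True
--         else:
--             normalized_count += 1
--             in_space = False
--         if normalized_count >= normalized_len: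
--             break
--     return prefix_len
-- ===== SOURCE B (Python) =====
-- def _normalized_prefix_length(text: str, normalized_len: int) -> int:
--     """Map normalized prefix length back to original text prefix length."""
--     if normalized_len <= 0:
--         return 0
--     n = len(text)
--     pos = 0
--     count = 0
--     while pos < n:
--         is_sp = text[pos].isspace()
--         j = pos
--         while j < n and text[j].isspace() == is_sp:
--             j += 1
--         if is_sp:
--             if count > 0:
--                 if count + 1 >= normalized_len:
--                     return pos + 1
--                 count += 1
--         else:
--             if count + (j - pos) >= normalized_len:
--                 return pos + (normalized_len - count)
--             count += j - pos
--         pos = j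
--     return n
-- ===== Notes on version B (the rewrite author's own statement) =====
-- stated objective: alternative
-- what changed: B replaces A's per-character state machine (in_space flag updated on every char) with a run-based scan: it jumps over each maximal whitespace/non-whitespace run at once, adding the run's contribution to the normalized count in one step and computing the answer inside a run by arithmetic instead of stepping char by char.
import Mathlib
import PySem

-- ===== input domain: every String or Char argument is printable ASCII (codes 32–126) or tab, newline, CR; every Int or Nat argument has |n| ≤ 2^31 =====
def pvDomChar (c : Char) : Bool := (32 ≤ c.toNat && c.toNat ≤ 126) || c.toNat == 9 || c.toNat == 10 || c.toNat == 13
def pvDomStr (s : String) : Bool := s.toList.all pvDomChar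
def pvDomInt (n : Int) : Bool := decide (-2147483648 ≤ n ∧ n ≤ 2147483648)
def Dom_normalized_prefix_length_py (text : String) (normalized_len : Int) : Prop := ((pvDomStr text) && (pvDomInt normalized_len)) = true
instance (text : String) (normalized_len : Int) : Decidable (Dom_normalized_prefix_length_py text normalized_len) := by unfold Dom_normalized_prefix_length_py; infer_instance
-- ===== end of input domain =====

-- B re-implements A with a run-based scan over maximal whitespace/non-whitespace runs
-- instead of A's per-character in_space state machine (alternative decomposition, same cost).

-- ===== PORT A =====
def pvAloop (nlen : Int) : List Char → Int → Int → Int → Bool → Int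
  | [], _, _, prefix_len, _ => prefix_len
  | ch :: rest, i, cnt, _, in_space =>
    let prefix_len := i + 1
    if PySem.Chars.isspace ch then
      let cnt' := if !in_space && cnt > 0 then cnt + 1 else cnt
      if cnt' ≥ nlen then prefix_len
      else pvAloop nlen rest (i + 1) cnt' prefix_len true
    else
      let cnt' := cnt + 1
      if cnt' ≥ nlen then prefix_len
      else pvAloop nlen rest (i + 1) cnt' prefix_len false

def normalized_prefix_length_py (text : String) (normalized_len : Int) : Int :=
  if normalized_len ≤ 0 then 0
  else pvAloop normalized_len text.toList 0 0 0 false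

-- ===== PORT B =====
def pvBrun (is_sp : Bool) (c : Char) : Bool :=
  PySem.Chars.isspace c == is_sp

def pvBloop (nlen : Int) : List Char → Int → Int → Int
  | [], pos, _ => pos
  | ch :: rest, pos, count =>
    let is_sp := PySem.Chars.isspace ch
    let run := (ch :: rest).takeWhile (pvBrun is_sp)
    let rest' := (ch :: rest).dropWhile (pvBrun is_sp)
    let L : Int := run.length
    if is_sp then
      if count > 0 then
        if count + 1 ≥ nlen then pos + 1
        else pvBloop nlen rest' (pos + L) (count + 1)
      else pvBloop nlen rest' (pos + L) count
    else
      if count + L ≥ nlen then pos + (nlen - count)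
      else pvBloop nlen rest' (pos + L) (count + L)
  termination_by l => l.length
  decreasing_by
    all_goals
      simp only [List.dropWhile]
      have h : pvBrun (PySem.Chars.isspace ch) ch = true := by simp [pvBrun]
      simp [h]
      exact List.length_dropWhile_le _ _

def normalized_prefix_length_py_alt (text : String) (normalized_len : Int) : Int :=
  if normalized_len ≤ 0 then 0
  else pvBloop normalized_len text.toList 0 0

-- ===== PRECONDITION & SPEC =====
def Spec_normalized_prefix_length_py (text : String) (normalized_len : Int) (out : Int) : Prop := out = normalized_prefix_length_py_alt text normalized_len
instance (text : String) (normalized_len : Int) (out : Int) : Decidable (Spec_normalized_prefix_length_py text normalized_len out) := by unfold Spec_normalized_prefix_length_py; infer_instance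

-- ===== CLAIM (what is proved, stated in full; the proofs are below) =====
def Claim_equal_normalized_prefix_length_py : Prop := ∀ (text : String) (normalized_len : Int), Dom_normalized_prefix_length_py text normalized_len → Spec_normalized_prefix_length_py text normalized_len (normalized_prefix_length_py text normalized_len)

-- ===== LEMMAS AND PROOFS =====
-- the first character of dropWhile fails the predicate (used for run maximality)
lemma pvB_head_dropWhile (p : Char → Bool) (l : List Char) (c : Char)
    (h : (l.dropWhile p).head? = some c) : p c = false := by
  induction l with
  | nil => simp [List.dropWhile] at h
  | cons a t ih =>
    rw [List.dropWhile_cons] at h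
    split at h
    · exact ih h
    · simp_all

-- one unfolding of pvBloop on a non-empty list
lemma pvBloop_cons (nlen : Int) (ch : Char) (rest : List Char) (pos count : Int) :
    pvBloop nlen (ch :: rest) pos count =
      if PySem.Chars.isspace ch = true then
        if count > 0 then
          if count + 1 ≥ nlen then pos + 1
          else pvBloop nlen (rest.dropWhile (pvBrun (PySem.Chars.isspace ch)))
            (pos + (((rest.takeWhile (pvBrun (PySem.Chars.isspace ch))).length : Int) + 1)) (count + 1)
        else pvBloop nlen (rest.dropWhile (pvBrun (PySem.Chars.isspace ch)))
          (pos + (((rest.takeWhile (pvBrun (PySem.Chars.isspace ch))).length : Int) + 1)) count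
      else
        if count + (((rest.takeWhile (pvBrun (PySem.Chars.isspace ch))).length : Int) + 1) ≥ nlen then
          pos + (nlen - count)
        else pvBloop nlen (rest.dropWhile (pvBrun (PySem.Chars.isspace ch)))
          (pos + (((rest.takeWhile (pvBrun (PySem.Chars.isspace ch))).length : Int) + 1))
          (count + (((rest.takeWhile (pvBrun (PySem.Chars.isspace ch))).length : Int) + 1)) := by
  rw [pvBloop]
  have hb : pvBrun (PySem.Chars.isspace ch) ch = true := by simp [pvBrun]
  simp only [List.takeWhile_cons, List.dropWhile_cons, hb, if_true, List.length_cons]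
  push_cast
  ring_nf

-- A over a maximal all-space run with in_space already true: the count never changes
lemma pvA_space_steady (nlen : Int) (run : List Char) : ∀ (rest : List Char) (i cnt : Int),
    (∀ c ∈ run, PySem.Chars.isspace c = true) → cnt < nlen →
    pvAloop nlen (run ++ rest) i cnt i true = pvAloop nlen rest (i + run.length) cnt (i + run.length) true := by
  induction run with
  | nil => intro rest i cnt _ _; simp
  | cons c run ih =>
    intro rest i cnt hall hlt
    have hc : PySem.Chars.isspace c = true := hall c (by simp)
    have h2 : ∀ c' ∈ run, PySem.Chars.isspace c' = true := fun c' hm => hall c' (by simp [hm])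
    simp only [List.cons_append, pvAloop, hc, if_true, Bool.not_true, Bool.false_and,
      Bool.false_eq_true, if_false]
    rw [if_neg (by omega)]
    rw [ih rest (i+1) cnt h2 hlt]
    congr 1 <;> simp only [List.length_cons] <;> push_cast <;> ring

-- A over an all-non-space run starting with in_space = false
lemma pvA_nonspace_run (nlen : Int) (run : List Char) : ∀ (rest : List Char) (i cnt : Int),
    (∀ c ∈ run, PySem.Chars.isspace c = false) → cnt < nlen →
    pvAloop nlen (run ++ rest) i cnt i false =
      if nlen ≤ cnt + run.length then i + (nlen - cnt)
      else pvAloop nlen rest (i + run.length) (cnt + run.length) (i + run.length) false := by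
  induction run with
  | nil =>
    intro rest i cnt _ hlt
    rw [if_neg (by simp only [List.length_nil]; push_cast; omega)]
    simp
  | cons c run ih =>
    intro rest i cnt hall hlt
    have hc : PySem.Chars.isspace c = false := hall c (by simp)
    have h2 : ∀ c' ∈ run, PySem.Chars.isspace c' = false := fun c' hm => hall c' (by simp [hm])
    simp only [List.cons_append, pvAloop, hc, Bool.false_eq_true, if_false]
    by_cases hstop : cnt + 1 ≥ nlen
    · rw [if_pos hstop, if_pos (by simp only [List.length_cons]; push_cast; omega)]
      omega
    · rw [if_neg hstop, ih rest (i+1) (cnt+1) h2 (by omega)]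
      by_cases hstop2 : nlen ≤ cnt + 1 + run.length
      · rw [if_pos hstop2, if_pos (by simp only [List.length_cons]; push_cast at hstop2 ⊢; omega)]
        omega
      · rw [if_neg hstop2, if_neg (by simp only [List.length_cons]; push_cast at hstop2 ⊢; omega)]
        congr 1 <;> simp only [List.length_cons] <;> push_cast <;> ring

lemma pv_main (nlen : Int) : ∀ (n : Nat) (l : List Char), l.length ≤ n → ∀ (i cnt : Int) (in_space : Bool),
    0 ≤ cnt → cnt < nlen →
    (in_space = true → cnt = 0 ∨ ∀ c, l.head? = some c → PySem.Chars.isspace c = false) →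
    pvAloop nlen l i cnt i in_space = pvBloop nlen l i cnt := by
  intro n
  induction n with
  | zero =>
    intro l hl i cnt in_space _ _ _
    have : l = [] := List.eq_nil_of_length_eq_zero (Nat.le_zero.mp hl)
    subst this; simp [pvAloop, pvBloop]
  | succ n ih =>
    intro l hl i cnt in_space h0 hlt hsp
    match l with
    | [] => simp [pvAloop, pvBloop]
    | ch :: rest =>
      have hTD : rest.takeWhile (pvBrun (PySem.Chars.isspace ch)) ++
          rest.dropWhile (pvBrun (PySem.Chars.isspace ch)) = rest :=
        List.takeWhile_append_dropWhile
      have hlen : (rest.dropWhile (pvBrun (PySem.Chars.isspace ch))).length ≤ n := by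
        have := List.length_dropWhile_le (pvBrun (PySem.Chars.isspace ch)) rest
        simp at hl; omega
      have hmem : ∀ c ∈ rest.takeWhile (pvBrun (PySem.Chars.isspace ch)),
          PySem.Chars.isspace c = PySem.Chars.isspace ch := by
        intro c hc
        have := List.mem_takeWhile_imp hc
        simpa [pvBrun] using this
      have hheadd : ∀ c, (rest.dropWhile (pvBrun (PySem.Chars.isspace ch))).head? = some c →
          PySem.Chars.isspace c ≠ PySem.Chars.isspace ch := by
        intro c hc
        have := pvB_head_dropWhile _ rest c hc
        simpa [pvBrun] using this
      rw [pvBloop_cons]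
      by_cases hch : PySem.Chars.isspace ch = true
      · -- space head
        rw [if_pos hch]
        by_cases hc0 : cnt = 0
        · subst hc0
          have hA : pvAloop nlen (ch :: rest) i 0 i in_space =
              pvAloop nlen rest (i + 1) 0 (i + 1) true := by
            simp only [pvAloop, hch, if_true]
            have hz : (!in_space && decide ((0:Int) > 0)) = false := by simp
            rw [hz]
            simp only [Bool.false_eq_true, if_false]
            rw [if_neg (by omega)]
          rw [hA, if_neg (by omega)]
          conv_lhs => rw [← hTD]
          rw [pvA_space_steady nlen _ _ _ _ (fun c hc => by rw [hmem c hc]; exact hch) hlt]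
          rw [ih (rest.dropWhile (pvBrun (PySem.Chars.isspace ch))) hlen
            (i + 1 + (rest.takeWhile (pvBrun (PySem.Chars.isspace ch))).length) 0 true
            le_rfl hlt (fun _ => Or.inl rfl)]
          congr 1
          ring
        · have hcpos : cnt > 0 := by omega
          have hisp : in_space = false := by
            cases hin : in_space
            · rfl
            · rcases hsp hin with h | h
              · exact absurd h hc0
              · exact absurd hch (by simp [h ch rfl])
          subst hisp
          have hA : pvAloop nlen (ch :: rest) i cnt i false =
              if cnt + 1 ≥ nlen then i + 1
              else pvAloop nlen rest (i + 1) (cnt + 1) (i + 1) true := by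
            simp only [pvAloop, hch, if_true, Bool.not_false, Bool.true_and]
            simp [hcpos]
          rw [hA, if_pos hcpos]
          by_cases hstop : cnt + 1 ≥ nlen
          · rw [if_pos hstop, if_pos hstop]
          · rw [if_neg hstop, if_neg hstop]
            conv_lhs => rw [← hTD]
            rw [pvA_space_steady nlen _ _ _ _ (fun c hc => by rw [hmem c hc]; exact hch) (by omega)]
            rw [ih (rest.dropWhile (pvBrun (PySem.Chars.isspace ch))) hlen
              (i + 1 + (rest.takeWhile (pvBrun (PySem.Chars.isspace ch))).length) (cnt + 1) true
              (by omega) (by omega)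
              (fun _ => Or.inr (fun c hc => by
                have := hheadd c hc
                rw [hch] at this
                simpa using this))]
            congr 1
            ring
      · -- non-space head
        have hchf : PySem.Chars.isspace ch = false := by simpa using hch
        rw [if_neg hch]
        have hA : pvAloop nlen (ch :: rest) i cnt i in_space =
            if cnt + 1 ≥ nlen then i + 1
            else pvAloop nlen rest (i + 1) (cnt + 1) (i + 1) false := by
          simp only [pvAloop, hchf, Bool.false_eq_true, if_false]
        rw [hA]
        by_cases hstop : cnt + 1 ≥ nlen
        · rw [if_pos hstop, if_pos (by
            have : (0:Int) ≤ ((rest.takeWhile (pvBrun (PySem.Chars.isspace ch))).length : Int) :=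
              Int.natCast_nonneg _
            omega)]
          omega
        · rw [if_neg hstop]
          conv_lhs => rw [← hTD]
          rw [pvA_nonspace_run nlen _ _ _ _ (fun c hc => by rw [hmem c hc]; exact hchf) (by omega)]
          by_cases hs2 : nlen ≤ cnt + 1 + ((rest.takeWhile (pvBrun (PySem.Chars.isspace ch))).length : Int)
          · rw [if_pos (by omega), if_pos (by omega)]
            omega
          · rw [if_neg (by omega), if_neg (by omega)]
            rw [ih (rest.dropWhile (pvBrun (PySem.Chars.isspace ch))) hlen
              (i + 1 + (rest.takeWhile (pvBrun (PySem.Chars.isspace ch))).length)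
              (cnt + 1 + (rest.takeWhile (pvBrun (PySem.Chars.isspace ch))).length) false
              (by have := Int.natCast_nonneg (rest.takeWhile (pvBrun (PySem.Chars.isspace ch))).length; omega)
              (by omega) (fun h => by simp at h)]
            congr 1 <;> ring

theorem normalized_prefix_length_py_spec : Claim_equal_normalized_prefix_length_py := by
  intro text normalized_len _
  unfold Spec_normalized_prefix_length_py normalized_prefix_length_py normalized_prefix_length_py_alt
  by_cases h : normalized_len ≤ 0
  · simp [h]
  · rw [if_neg h, if_neg h]
    exact pv_main normalized_len text.toList.length text.toList le_rfl 0 0 false le_rfl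
      (by omega) (fun _ => Or.inl rfl)
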